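-- pv_equiv track=rewrite | github.com/zashari/alzheimer-desease-classification | processing_pipeline/utils/utils.py | extract_subject_id_from_filename
-- ===== SOURCE A (Python) =====
-- def extract_subject_id_from_filename(filename: str) -> str | None:
--     """
--     Extracts a subject ID (e.g., '002_S_0295') from various filename formats.
--
--     Handles original files, augmented files, and different processing stages.
--     - Original: '002_S_0295_sc_axial_x123.png' -> '002_S_0295'
--     - Augmented: 'AUG_AAA_002_S_0295_sc_axial_x123.png' -> '002_S_0295'
--     """
--     # Clean up common extensions
--     clean_name = filename.replace('.nii.gz', '').replace('.nii', '').replace('.png', '')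
--     parts = clean_name.split('_')
--
--     # Find the XXX_S_YYYY pattern
--     for i in range(len(parts) - 2):
--         if (parts[i].isdigit() and
--             parts[i+1] == 'S' and
--             parts[i+2].isdigit()):
--             return f"{parts[i]}_S_{parts[i+2]}"
--     return None
-- ===== SOURCE B (Python) =====
-- def _leading_digits(t):
--     i = 0
--     while i < len(t) and t[i].isdigit():
--         i += 1
--     return t[:i]
--
--
-- def extract_subject_id_from_filename(filename):
--     """Single left-to-right character scan over the cleaned name: at each token
--     start, try to read digits + '_S_' + digits ending at a token boundary;
--     otherwise jump to the next '_' (no token list is ever built)."""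
--     s = filename.replace('.nii.gz', '').replace('.nii', '').replace('.png', '')
--     rest = s
--     while True:
--         d1 = _leading_digits(rest)
--         if d1:
--             after = rest[len(d1):]
--             if after.startswith('_S_'):
--                 d2 = _leading_digits(after[3:])
--                 if d2 and (len(after) == 3 + len(d2) or after[3 + len(d2)] == '_'):
--                     return d1 + '_S_' + d2
--         cut = rest.find('_')
--         if cut == -1:
--             return None
--         rest = rest[cut + 1:]
-- ===== Notes on version B (the rewrite author's own statement) =====
-- stated objective: alternative
-- what changed: B never builds a token list: instead of splitting on underscores and index-looping over token triples, it makes one character-level scan that at each token start reads a leading digit run, the literal separator-S-separator infix and a closing digit run ending at a token boundary, otherwise jumping past the next separator.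
import Mathlib
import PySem

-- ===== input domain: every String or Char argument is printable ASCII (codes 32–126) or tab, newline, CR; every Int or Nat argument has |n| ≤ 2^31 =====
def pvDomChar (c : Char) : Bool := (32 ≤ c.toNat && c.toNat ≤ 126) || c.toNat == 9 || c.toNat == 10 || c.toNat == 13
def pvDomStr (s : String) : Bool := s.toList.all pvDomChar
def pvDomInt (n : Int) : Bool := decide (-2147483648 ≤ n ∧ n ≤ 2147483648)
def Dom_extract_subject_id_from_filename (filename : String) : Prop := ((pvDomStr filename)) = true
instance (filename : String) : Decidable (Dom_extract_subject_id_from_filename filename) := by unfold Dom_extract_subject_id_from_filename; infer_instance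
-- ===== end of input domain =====

-- B replaces the underscore-split plus index loop over token triples by one
-- character-level scan matching digits, separator-S-separator, digits at token
-- boundaries (objective: alternative).

-- ===== PORT A =====
-- clean_name = filename.replace('.nii.gz','').replace('.nii','').replace('.png','')
-- (worked on code-point lists; String.mk only at the very end)
def aClean (filename : String) : List Char :=
  PySem.Chars.replace
    (PySem.Chars.replace
      (PySem.Chars.replace filename.toList ".nii.gz".toList [])
      ".nii".toList [])
    ".png".toList []

-- for i in range(len(parts) - 2): if parts[i].isdigit() and parts[i+1]=='S' and parts[i+2].isdigit(): return …
def aLoop (parts : List (List Char)) : List Int → Option (List Char)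
  | [] => none
  | i :: is =>
    if PySem.Chars.strIsdigit (PySem.List.pyGetD parts i [])
        && (PySem.List.pyGetD parts (i + 1) [] == ['S'])
        && PySem.Chars.strIsdigit (PySem.List.pyGetD parts (i + 2) []) then
      some (PySem.List.pyGetD parts i [] ++ '_' :: 'S' :: '_' :: PySem.List.pyGetD parts (i + 2) [])
    else aLoop parts is

def extract_subject_id_from_filename (filename : String) : Option String :=
  let parts := PySem.Chars.splitOn (aClean filename) ['_']   -- clean_name.split('_')
  (aLoop parts (PySem.List.pyRange 0 ((parts.length : Int) - 2) 1)).map String.mk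

-- ===== PORT B =====
-- _leading_digits: while i < len(t) and t[i].isdigit(): i += 1; return t[:i]
def bDigits : List Char → List Char
  | [] => []
  | c :: cs => if PySem.Chars.isdigit c then c :: bDigits cs else []

-- helper for bScan's termination (the scan always advances past a '_')
theorem bScan_dec (rest : List Char) (h : ¬ PySem.Chars.find rest ['_'] = -1) :
    (rest.drop ((PySem.Chars.find rest ['_']).toNat + 1)).length < rest.length := by
  have hin : ['_'] <:+: rest := by
    rcases lt_or_eq_of_le (PySem.Chars.neg_one_le_find rest ['_']) with h' | h'
    · exact (PySem.Chars.find_nonneg_iff rest ['_']).1 (by omega)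
    · exact absurd h'.symm h
  have : rest ≠ [] := by
    rintro rfl
    simpa using hin.length_le
  have : 0 < rest.length := List.length_pos_iff.2 this
  simp only [List.length_drop]
  omega

-- the while loop of B: try a match at the current token start, else jump past the next '_'
def bScan (rest : List Char) : Option (List Char) :=
  let d1 := bDigits rest
  let attempt : Option (List Char) :=
    if d1.isEmpty then none
    else
      let after := rest.drop d1.length        -- rest[len(d1):]  (start ≥ 0: slice = drop)
      if PySem.Chars.startswith after ['_', 'S', '_'] then
        let d2 := bDigits (after.drop 3)      -- after[3:]
        -- 'd2 and (len(after) == 3+len(d2) or after[3+len(d2)] == '_')' — the or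
        -- short-circuits, so the index is in range when read (getElem? is exact there)
        if !d2.isEmpty && (after.length == 3 + d2.length || after[3 + d2.length]? == some '_') then
          some (d1 ++ '_' :: 'S' :: '_' :: d2)
        else none
      else none
  match attempt with
  | some r => some r
  | none =>
    let cut := PySem.Chars.find rest ['_']    -- rest.find('_')
    if h : cut = -1 then none
    else bScan (rest.drop (cut.toNat + 1))    -- rest = rest[cut+1:]
termination_by rest.length
decreasing_by exact bScan_dec rest h

-- s = filename.replace('.nii.gz','').replace('.nii','').replace('.png','')
def bClean (filename : String) : List Char :=
  PySem.Chars.replace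
    (PySem.Chars.replace
      (PySem.Chars.replace filename.toList ".nii.gz".toList [])
      ".nii".toList [])
    ".png".toList []

def extract_subject_id_from_filename_alt (filename : String) : Option String :=
  (bScan (bClean filename)).map String.mk

-- ===== PRECONDITION & SPEC =====
def Spec_extract_subject_id_from_filename (filename : String) (out : Option String) : Prop := out = extract_subject_id_from_filename_alt filename
instance (filename : String) (out : Option String) : Decidable (Spec_extract_subject_id_from_filename filename out) := by unfold Spec_extract_subject_id_from_filename; infer_instance

-- ===== CLAIM (what is proved, stated in full; the proofs are below) =====
def Claim_equal_extract_subject_id_from_filename : Prop := ∀ (filename : String), Dom_extract_subject_id_from_filename filename → Spec_extract_subject_id_from_filename filename (extract_subject_id_from_filename filename)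

-- ===== LEMMAS AND PROOFS =====

-- reference splitter: split on '_' as a plain structural recursion
def splitU : List Char → List (List Char)
  | [] => [[]]
  | c :: rest =>
    if c = '_' then [] :: splitU rest
    else
      match splitU rest with
      | t :: ts => (c :: t) :: ts
      | [] => [[c]]

-- reference matcher over the token list
def findT : List (List Char) → Option (List Char)
  | a :: b :: c :: ts =>
    if PySem.Chars.strIsdigit a && (b == ['S']) && PySem.Chars.strIsdigit c then
      some (a ++ '_' :: 'S' :: '_' :: c)
    else findT (b :: c :: ts)
  | _ => none

theorem splitU_ne_nil (cs : List Char) : splitU cs ≠ [] := by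
  cases cs with
  | nil => simp [splitU]
  | cons c rest =>
    simp only [splitU]
    split
    · simp
    · split <;> simp_all

def consHead (x : List Char) : List (List Char) → List (List Char)
  | [] => [x]
  | t :: ts => (x ++ t) :: ts

theorem splitOn_go_eq (l : List Char) : ∀ (fuel : Nat) (cur : List Char) (acc : List (List Char)),
    l.length < fuel →
    PySem.Chars.splitOn.go ['_'] fuel l cur acc = acc.reverse ++ consHead cur.reverse (splitU l) := by
  induction l with
  | nil =>
    intro fuel cur acc h
    obtain ⟨f, rfl⟩ : ∃ f, fuel = f + 1 := ⟨fuel - 1, by omega⟩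
    simp [PySem.Chars.splitOn.go, splitU, consHead]
  | cons c rest ih =>
    intro fuel cur acc h
    obtain ⟨f, rfl⟩ : ∃ f, fuel = f + 1 := ⟨fuel - 1, by omega⟩
    simp only [List.length_cons] at h
    by_cases hc : c = '_'
    · subst hc
      have hp : List.isPrefixOf ['_'] ('_' :: rest) = true := by simp [List.isPrefixOf]
      simp only [PySem.Chars.splitOn.go, hp, if_pos]
      rw [show List.drop (['_'].length) ('_' :: rest) = rest from rfl]
      rw [ih f [] (cur.reverse :: acc) (by omega)]
      rw [show splitU ('_' :: rest) = [] :: splitU rest from by rw [splitU]; simp]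
      cases hs : splitU rest with
      | nil => exact absurd hs (splitU_ne_nil _)
      | cons t ts => simp [consHead]
    · have hp : List.isPrefixOf ['_'] (c :: rest) = false := by
        simp [List.isPrefixOf]; exact Ne.symm hc
      simp only [PySem.Chars.splitOn.go, hp, Bool.false_eq_true, if_false]
      rw [ih f (c :: cur) acc (by omega)]
      rw [show splitU (c :: rest) = (match splitU rest with
            | t :: ts => (c :: t) :: ts | [] => [[c]]) from by rw [splitU]; simp [hc]]
      cases hs : splitU rest with
      | nil => exact absurd hs (splitU_ne_nil _)
      | cons t ts => simp [consHead]

theorem splitOn_eq_splitU (cs : List Char) : PySem.Chars.splitOn cs ['_'] = splitU cs := by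
  unfold PySem.Chars.splitOn
  rw [splitOn_go_eq cs (cs.length + 1) [] [] (by omega)]
  cases hs : splitU cs with
  | nil => exact absurd hs (splitU_ne_nil _)
  | cons t ts => simp [consHead]

theorem findT_short (l : List (List Char)) (h : l.length < 3) : findT l = none := by
  match l, h with
  | [], _ => rfl
  | [a], _ => rfl
  | [a, b], _ => rfl

theorem pyRange_one_nil (a b : Int) (h : b ≤ a) : PySem.List.pyRange a b 1 = [] := by
  simp [PySem.List.pyRange, not_lt.2 h]

theorem aLoop_aux (n : Nat) : ∀ (parts : List (List Char)) (k : Nat), parts.length ≤ k + n →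
    aLoop parts (PySem.List.pyRange (k : Int) ((parts.length : Int) - 2) 1) = findT (parts.drop k) := by
  induction n with
  | zero =>
    intro parts k h
    rw [pyRange_one_nil _ _ (by push_cast; omega)]
    rw [List.drop_eq_nil_of_le (by omega), aLoop]
    rfl
  | succ n ih =>
    intro parts k hn
    by_cases hlt : k + 2 < parts.length
    · rw [PySem.List.pyRange_one_cons (by push_cast; omega)]
      rw [aLoop]
      have e1 : ((k : Int) + 1) = ((k + 1 : Nat) : Int) := by push_cast; ring
      have e2 : ((k : Int) + 2) = ((k + 2 : Nat) : Int) := by push_cast; ring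
      rw [e1, e2]
      simp only [PySem.List.pyGetD_natCast]
      rw [List.getD_eq_getElem _ _ (by omega : k < parts.length),
          List.getD_eq_getElem _ _ (by omega : k + 1 < parts.length),
          List.getD_eq_getElem _ _ (by omega : k + 2 < parts.length)]
      rw [List.drop_eq_getElem_cons (by omega : k < parts.length),
          List.drop_eq_getElem_cons (by omega : k + 1 < parts.length),
          List.drop_eq_getElem_cons (by omega : k + 2 < parts.length)]
      rw [findT]
      by_cases hc : (PySem.Chars.strIsdigit parts[k] && (parts[k + 1] == ['S'])
          && PySem.Chars.strIsdigit parts[k + 2]) = true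
      · rw [if_pos hc, if_pos hc]
      · rw [if_neg hc, if_neg hc]
        rw [← List.drop_eq_getElem_cons (by omega : k + 2 < parts.length),
            ← List.drop_eq_getElem_cons (by omega : k + 1 < parts.length)]
        rw [← e1]
        have := ih parts (k + 1) (by omega)
        rw [show ((k + 1 : Nat) : Int) = (k : Int) + 1 from by push_cast; ring] at this
        exact this
    · rw [pyRange_one_nil _ _ (by push_cast; omega)]
      rw [aLoop, findT_short _ (by simp [List.length_drop]; omega)]

theorem aLoop_eq_findT (parts : List (List Char)) (k : Nat) :
    aLoop parts (PySem.List.pyRange (k : Int) ((parts.length : Int) - 2) 1) = findT (parts.drop k) := by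
  exact aLoop_aux parts.length parts k (by omega)

theorem bDigits_eq_takeWhile (cs : List Char) : bDigits cs = cs.takeWhile PySem.Chars.isdigit := by
  induction cs with
  | nil => rfl
  | cons c rest ih => simp [bDigits, List.takeWhile, ih]; split <;> simp_all

-- splitU of a string with no '_' / with a first '_'
theorem splitU_of_not_mem (cs : List Char) (h : '_' ∉ cs) : splitU cs = [cs] := by
  induction cs with
  | nil => rfl
  | cons c rest ih =>
    simp only [List.mem_cons, not_or] at h
    simp [splitU, Ne.symm h.1, ih h.2]

theorem splitU_append (pre suf : List Char) (h : '_' ∉ pre) :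
    splitU (pre ++ '_' :: suf) = pre :: splitU suf := by
  induction pre with
  | nil => simp [splitU]
  | cons c rest ih =>
    simp only [List.mem_cons, not_or] at h
    simp [splitU, Ne.symm h.1, ih h.2]

-- inversion
theorem splitU_inv (cs : List Char) (a : List Char) (ts : List (List Char))
    (h : splitU cs = a :: ts) :
    '_' ∉ a ∧ (ts = [] → cs = a) ∧ (ts ≠ [] → ∃ suf, cs = a ++ '_' :: suf ∧ splitU suf = ts) := by
  induction cs generalizing a ts with
  | nil =>
    simp only [splitU, List.cons.injEq] at h
    obtain ⟨rfl, rfl⟩ := h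
    exact ⟨by simp, fun _ => rfl, by simp⟩
  | cons c rest ih =>
    by_cases hc : c = '_'
    · subst hc
      rw [show splitU ('_' :: rest) = [] :: splitU rest from by rw [splitU]; simp] at h
      simp only [List.cons.injEq] at h
      obtain ⟨rfl, hts⟩ := h
      refine ⟨by simp, ?_, ?_⟩
      · intro h0; rw [h0] at hts; exact absurd hts (splitU_ne_nil _)
      · intro _; exact ⟨rest, by simp, hts⟩
    · rw [show splitU (c :: rest) = (match splitU rest with
            | t :: ts => (c :: t) :: ts | [] => [[c]]) from by rw [splitU]; simp [hc]] at h
      cases hs : splitU rest with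
      | nil => exact absurd hs (splitU_ne_nil _)
      | cons t ts' =>
        rw [hs] at h
        simp only [List.cons.injEq] at h
        obtain ⟨rfl, rfl⟩ := h
        obtain ⟨h1, h2, h3⟩ := ih t ts' hs
        refine ⟨by simp [h1]; exact Ne.symm hc, ?_, ?_⟩
        · intro h0; rw [h2 h0]
        · intro h0
          obtain ⟨suf, hsuf, hsp⟩ := h3 h0
          exact ⟨suf, by rw [hsuf]; simp, hsp⟩

-- B's single match attempt, as a standalone function of the scan head
def bMatch (rest : List Char) : Option (List Char) :=
  let d1 := bDigits rest
  if d1.isEmpty then none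
  else
    let after := rest.drop d1.length
    if PySem.Chars.startswith after ['_', 'S', '_'] then
      let d2 := bDigits (after.drop 3)
      if !d2.isEmpty && (after.length == 3 + d2.length || after[3 + d2.length]? == some '_') then
        some (d1 ++ '_' :: 'S' :: '_' :: d2)
      else none
    else none

def tMatch : List (List Char) → Option (List Char)
  | a :: b :: c :: _ =>
    if PySem.Chars.strIsdigit a && (b == ['S']) && PySem.Chars.strIsdigit c then
      some (a ++ '_' :: 'S' :: '_' :: c)
    else none
  | _ => none

theorem findT_cons (a : List Char) (rest : List (List Char)) :
    findT (a :: rest) = match tMatch (a :: rest) with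
      | some r => some r
      | none => findT rest := by
  match rest with
  | [] => rfl
  | [b] => rfl
  | b :: c :: ts => simp only [findT, tMatch]; split <;> rfl

theorem drop_takeWhile_length (p : Char → Bool) (cs : List Char) :
    cs.drop (cs.takeWhile p).length = cs.dropWhile p := by
  induction cs with
  | nil => rfl
  | cons c l ih =>
    by_cases h : p c
    · simp [List.dropWhile_cons, h, ih]
    · simp [List.takeWhile_cons, h]

theorem cs_eq_bDigits_append (cs : List Char) :
    cs = bDigits cs ++ cs.drop (bDigits cs).length := by
  rw [bDigits_eq_takeWhile, drop_takeWhile_length]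
  exact (List.takeWhile_append_dropWhile).symm

theorem bDigits_all (cs : List Char) : ∀ x ∈ bDigits cs, PySem.Chars.isdigit x = true := by
  rw [bDigits_eq_takeWhile]; exact fun x hx => List.mem_takeWhile_imp hx

theorem underscore_not_mem_bDigits (cs : List Char) : '_' ∉ bDigits cs := by
  intro h; have := bDigits_all cs '_' h; simp [PySem.Chars.isdigit] at this

theorem bDigits_of_all (a : List Char) (h : ∀ x ∈ a, PySem.Chars.isdigit x = true) :
    bDigits a = a := by
  rw [bDigits_eq_takeWhile]; exact List.takeWhile_eq_self_iff.mpr h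

theorem bDigits_append_nondigit (a : List Char) (c : Char) (r : List Char)
    (ha : ∀ x ∈ a, PySem.Chars.isdigit x = true) (hc : PySem.Chars.isdigit c = false) :
    bDigits (a ++ c :: r) = a := by
  rw [bDigits_eq_takeWhile, List.takeWhile_append_of_pos ha,
      List.takeWhile_cons_of_neg (by simp [hc]), List.append_nil]

theorem strIsdigit_iff (a : List Char) :
    PySem.Chars.strIsdigit a = true ↔ a ≠ [] ∧ ∀ x ∈ a, PySem.Chars.isdigit x = true := by
  simp [PySem.Chars.strIsdigit, List.all_eq_true]

theorem strIsdigit_bDigits_of_ne (cs : List Char) (h : bDigits cs ≠ []) :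
    PySem.Chars.strIsdigit (bDigits cs) = true :=
  (strIsdigit_iff _).mpr ⟨h, bDigits_all cs⟩

-- forward: a successful scan-head match is a successful token-triple match
theorem bMatch_some (cs : List Char) (r : List Char) (hb : bMatch cs = some r) :
    tMatch (splitU cs) = some r := by
  simp only [bMatch] at hb
  by_cases h1 : (bDigits cs).isEmpty
  · simp [h1] at hb
  simp only [h1, Bool.false_eq_true, if_false] at hb
  by_cases h2 : PySem.Chars.startswith (cs.drop (bDigits cs).length) ['_', 'S', '_'] = true
  swap
  · simp [h2] at hb
  simp only [h2, if_true] at hb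
  set after := cs.drop (bDigits cs).length with hafter
  set d1 := bDigits cs with hd1
  set d2 := bDigits (after.drop 3) with hd2
  by_cases h3 : (!d2.isEmpty && (after.length == 3 + d2.length || after[3 + d2.length]? == some '_')) = true
  swap
  · simp only [h3, Bool.false_eq_true, if_false] at hb; exact absurd hb (by simp)
  simp only [h3, if_true, Option.some.injEq] at hb
  -- decompose: after = '_' :: 'S' :: '_' :: tail
  obtain ⟨tail0, hpre⟩ : ∃ t, after = '_' :: 'S' :: '_' :: t := by
    obtain ⟨t, ht⟩ := (PySem.Chars.startswith_iff _ _).mp h2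
    exact ⟨t, by rw [← ht]; rfl⟩
  have htail : after.drop 3 = tail0 := by rw [hpre]; rfl
  rw [htail] at hd2
  have hcs : cs = d1 ++ '_' :: 'S' :: '_' :: tail0 := by
    conv_lhs => rw [cs_eq_bDigits_append cs]
    rw [← hd1, ← hafter, hpre]
  simp only [Bool.and_eq_true, Bool.not_eq_eq_eq_not, Bool.not_true, Bool.or_eq_true, beq_iff_eq] at h3
  obtain ⟨hne2, hor⟩ := h3
  have hne2' : d2 ≠ [] := by simpa [List.isEmpty_iff] using hne2
  have hne1' : d1 ≠ [] := by simpa [List.isEmpty_iff] using h1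
  have hd2pre : d2 <+: tail0 := by
    rw [hd2, bDigits_eq_takeWhile]; exact List.takeWhile_prefix _
  have hsplit_tail : ∃ ts, splitU tail0 = d2 :: ts := by
    rcases hor with hlen | hidx
    · -- len(after) == 3 + len(d2): tail0 = d2
      have : tail0.length = d2.length := by
        rw [hpre] at hlen; simp at hlen; omega
      have : d2 = tail0 := hd2pre.eq_of_length (by omega)
      refine ⟨[], ?_⟩
      rw [← this, splitU_of_not_mem d2 (by rw [hd2]; exact underscore_not_mem_bDigits _)]
    · -- after[3+len(d2)] == '_': tail0 = d2 ++ '_' :: suf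
      have hidx' : tail0[d2.length]? = some '_' := by
        rw [hpre, show 3 + d2.length = d2.length + 3 from by omega] at hidx
        simpa [List.getElem?_cons_succ] using hidx
      have hdec : tail0 = d2 ++ tail0.drop d2.length := by
        conv_lhs => rw [cs_eq_bDigits_append tail0]
        rw [← hd2]
      obtain ⟨suf, hsuf⟩ : ∃ s, tail0.drop d2.length = '_' :: s := by
        have : (tail0.drop d2.length).head? = some '_' := by rw [List.head?_drop]; exact hidx'
        cases hh : tail0.drop d2.length with
        | nil => rw [hh] at this; simp at this
        | cons x xs => rw [hh] at this; simp at this; exact ⟨xs, by rw [this]⟩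
      refine ⟨splitU suf, ?_⟩
      rw [hdec, hsuf, splitU_append _ _ (by rw [hd2]; exact underscore_not_mem_bDigits _)]
  obtain ⟨ts, hts⟩ := hsplit_tail
  have : splitU cs = d1 :: ['S'] :: d2 :: ts := by
    rw [hcs, splitU_append _ _ (by rw [hd1]; exact underscore_not_mem_bDigits _)]
    rw [show ('S' :: '_' :: tail0) = ['S'] ++ '_' :: tail0 from rfl,
        splitU_append _ _ (by decide), hts]
  have g1 : PySem.Chars.strIsdigit d1 = true := by
    rw [hd1]; exact strIsdigit_bDigits_of_ne cs (hd1 ▸ hne1')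
  have g2 : PySem.Chars.strIsdigit d2 = true := by
    rw [hd2]; exact strIsdigit_bDigits_of_ne tail0 (hd2 ▸ hne2')
  rw [this]
  simp only [tMatch]
  rw [if_pos (by simp [g1, g2])]
  rw [hb]

-- backward: a successful token-triple match is a successful scan-head match
theorem tMatch_some (cs : List Char) (r : List Char) (ht : tMatch (splitU cs) = some r) :
    bMatch cs = some r := by
  match hsp : splitU cs with
  | [] => rw [hsp] at ht; exact absurd ht (by simp [tMatch])
  | [a] => rw [hsp] at ht; exact absurd ht (by simp [tMatch])
  | [a, b] => rw [hsp] at ht; exact absurd ht (by simp [tMatch])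
  | a :: b :: c :: ts =>
    rw [hsp] at ht
    simp only [tMatch] at ht
    split_ifs at ht with hcond
    simp only [Option.some.injEq] at ht
    simp only [Bool.and_eq_true, beq_iff_eq] at hcond
    obtain ⟨⟨hda, rfl⟩, hdc⟩ := hcond
    obtain ⟨hane, haall⟩ := (strIsdigit_iff a).mp hda
    obtain ⟨hcne, hcall⟩ := (strIsdigit_iff c).mp hdc
    obtain ⟨-, -, h3⟩ := splitU_inv cs a (['S'] :: c :: ts) hsp
    obtain ⟨suf1, hcs1, hsp1⟩ := h3 (by simp)
    obtain ⟨-, -, h3'⟩ := splitU_inv suf1 ['S'] (c :: ts) hsp1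
    obtain ⟨suf2, hsuf1, hsp2⟩ := h3' (by simp)
    obtain ⟨-, h2'', h3''⟩ := splitU_inv suf2 c ts hsp2
    have hcs : cs = a ++ '_' :: 'S' :: '_' :: suf2 := by
      rw [hcs1, hsuf1]; simp
    have hA : bDigits cs = a := by
      rw [hcs]; exact bDigits_append_nondigit a '_' _ haall (by decide)
    have hafter : cs.drop a.length = '_' :: 'S' :: '_' :: suf2 := by
      rw [hcs]; exact List.drop_left
    have hC : bDigits suf2 = c ∧
        (suf2 = c ∨ suf2[c.length]? = some '_') := by
      by_cases hts : ts = []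
      · have : suf2 = c := h2'' hts
        exact ⟨by rw [this]; exact bDigits_of_all c hcall, Or.inl this⟩
      · obtain ⟨suf3, hsuf2, -⟩ := h3'' hts
        refine ⟨by rw [hsuf2]; exact bDigits_append_nondigit c '_' _ hcall (by decide), Or.inr ?_⟩
        rw [hsuf2, List.getElem?_append_right (by omega)]
        simp
    simp only [bMatch]
    rw [hA, hafter]
    rw [if_neg (by simp [List.isEmpty_iff, hane]),
        if_pos (show PySem.Chars.startswith ('_' :: 'S' :: '_' :: suf2) ['_', 'S', '_'] = true
          from (PySem.Chars.startswith_iff _ _).mpr ⟨suf2, rfl⟩)]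
    rw [show List.drop 3 ('_' :: 'S' :: '_' :: suf2) = suf2 from rfl, hC.1]
    rw [if_pos]
    · rw [← ht]
    · simp only [Bool.and_eq_true, Bool.not_eq_eq_eq_not, Bool.not_true, Bool.or_eq_true,
        beq_iff_eq, List.isEmpty_eq_false_iff, ne_eq]
      refine ⟨hcne, ?_⟩
      rcases hC.2 with hh | hh
      · left; simp [hh]; omega
      · right
        rw [show 3 + c.length = c.length + 3 from by omega]
        simpa [List.getElem?_cons_succ] using hh

theorem bMatch_eq_tMatch (cs : List Char) : bMatch cs = tMatch (splitU cs) := by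
  cases hb : bMatch cs with
  | some r => exact (bMatch_some cs r hb).symm
  | none =>
    cases ht : tMatch (splitU cs) with
    | none => rfl
    | some r => rw [tMatch_some cs r ht] at hb; exact absurd hb (by simp)

theorem prefix_underscore_drop (l : List Char) (i : Nat) (h : i < l.length)
    (hg : l[i] = '_') : ['_'] <+: l.drop i := by
  have hh : (l.drop i).head? = some '_' := by
    rw [List.head?_drop]; simp [List.getElem?_eq_getElem h, hg]
  cases hd : l.drop i with
  | nil => rw [hd] at hh; simp at hh
  | cons x xs => rw [hd] at hh; simp at hh; exact ⟨xs, by simp [hh]⟩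

theorem bScan_unfold (cs : List Char) : bScan cs =
    match bMatch cs with
    | some r => some r
    | none =>
      if PySem.Chars.find cs ['_'] = -1 then none
      else bScan (cs.drop ((PySem.Chars.find cs ['_']).toNat + 1)) := by
  rw [bScan]; rfl

theorem bScan_aux (n : Nat) : ∀ (cs : List Char), cs.length ≤ n →
    bScan cs = findT (splitU cs) := by
  induction n with
  | zero =>
    intro cs h
    cases cs with
    | nil => rw [bScan_unfold]; rfl
    | cons c l => simp at h
  | succ n ih =>
    intro cs hlen
    rw [bScan_unfold]
    cases hm : bMatch cs with
    | some r =>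
      rw [bMatch_eq_tMatch] at hm
      cases hs : splitU cs with
      | nil => exact absurd hs (splitU_ne_nil _)
      | cons t rest =>
        rw [hs] at hm
        rw [findT_cons, hm]
    | none =>
      by_cases hfind : PySem.Chars.find cs ['_'] = -1
      · rw [if_pos hfind]
        have : '_' ∉ cs := by
          intro hmem
          exact ((PySem.Chars.find_eq_neg_one_iff cs ['_']).mp hfind)
            ((List.singleton_infix_iff '_' cs).mpr hmem)
        rw [splitU_of_not_mem cs this]
        rfl
      · rw [if_neg hfind]
        have hpos : 0 ≤ PySem.Chars.find cs ['_'] := by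
          rcases lt_or_eq_of_le (PySem.Chars.neg_one_le_find cs ['_']) with h' | h'
          · omega
          · exact absurd h'.symm hfind
        set k := (PySem.Chars.find cs ['_']).toNat with hk
        obtain ⟨hpre, hbefore⟩ := PySem.Chars.find_spec hpos
        have hklen : k < cs.length := by
          have := PySem.Chars.find_le_length cs ['_']
          by_cases hq : k < cs.length
          · exact hq
          · exfalso
            have : cs.drop k = [] := List.drop_eq_nil_of_le (by omega)
            rw [this] at hpre
            simpa using hpre.length_le
        -- cs = take k ++ '_' :: drop (k+1), no '_' in take k
        obtain ⟨rest0, hrest0⟩ : ∃ r, cs.drop k = '_' :: r := by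
          obtain ⟨t, htp⟩ := hpre
          exact ⟨t, by rw [← htp]; rfl⟩
        have hsuf : cs.drop (k + 1) = rest0 := by
          have h2 : cs[k] :: cs.drop (k + 1) = '_' :: rest0 := by
            rw [← List.drop_eq_getElem_cons hklen, hrest0]
          injection h2
        have hdec : cs = cs.take k ++ '_' :: cs.drop (k + 1) := by
          rw [hsuf, ← hrest0, List.take_append_drop]
        have hnom : '_' ∉ cs.take k := by
          intro hmem
          obtain ⟨i, hi, hig⟩ := List.getElem_of_mem hmem
          have hik : i < k := by simpa using (List.length_take_le k cs).trans_lt' hi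
          have : i < cs.length := by omega
          exact hbefore i hik (by
            rw [List.getElem_take] at hig
            exact prefix_underscore_drop cs i this hig)
        rw [show findT (splitU cs) = findT (splitU (cs.drop (k + 1))) from by
          conv_lhs => rw [hdec]
          rw [splitU_append _ _ hnom, findT_cons]
          rw [show tMatch (cs.take k :: splitU (List.drop (k + 1) cs)) = none from by
            rw [← splitU_append _ _ hnom, ← hdec, ← bMatch_eq_tMatch]
            exact hm]]
        exact ih _ (by simp [List.length_drop]; omega)

theorem bScan_eq_findT (cs : List Char) : bScan cs = findT (splitU cs) :=
  bScan_aux cs.length cs (le_refl _)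

-- ===== VERDICT (by name: the statement is the Claim_ definition above) =====
theorem extract_subject_id_from_filename_spec : Claim_equal_extract_subject_id_from_filename := by
  intro filename _
  unfold Spec_extract_subject_id_from_filename
  unfold extract_subject_id_from_filename extract_subject_id_from_filename_alt
  simp only [splitOn_eq_splitU, bScan_eq_findT]
  rw [show bClean filename = aClean filename from rfl]
  rw [show (PySem.List.pyRange 0 ((splitU (aClean filename)).length - 2 : Int) 1)
        = PySem.List.pyRange ((0 : Nat) : Int) ((splitU (aClean filename)).length - 2 : Int) 1 by norm_num,
      aLoop_eq_findT]
  simp
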